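-- pv_equiv track=rewrite | github.com/slalom/dataops-infra | docs/build.py | _proper
-- ===== SOURCE A (Python) =====
-- SPECIAL_CASE_WORDS = [
--     "AWS",
--     "ECR",
--     "ECS",
--     "IAM",
--     "VPC",
--     "DBT",
--     "EC2",
--     "RDS",
--     "MySQL",
--     "ML",
--     "MLOps",
-- ]
--
-- def _proper(str, title_case=True):
--     """
--     Return the same string in proper case, respected override rules for "
--     acronyms and special-cased words.
--     """
--     word_lookup = {w.lower(): w for w in SPECIAL_CASE_WORDS}
--     if title_case:
--         str = str.title()
--     words = str.split(" ")
--     new_words = []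
--     for word in words:
--         new_subwords = []
--         for subword in word.split("-"):
--             new_subwords.append(word_lookup.get(subword.lower(), subword))
--         new_word = "-".join(new_subwords)
--         new_words.append(new_word)
--     return " ".join(new_words)
-- ===== SOURCE B (Python) =====
-- SPECIAL_CASE_WORDS = [
--     "AWS",
--     "ECR",
--     "ECS",
--     "IAM",
--     "VPC",
--     "DBT",
--     "EC2",
--     "RDS",
--     "MySQL",
--     "ML",
--     "MLOps",
-- ]
--
-- def _proper(str, title_case=True):
--     """Proper-case with acronym overrides: one flat scan over the string,
--     flushing each token at every space/hyphen (no nested split/join passes)."""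
--     word_lookup = {w.lower(): w for w in SPECIAL_CASE_WORDS}
--     if title_case:
--         str = str.title()
--     out = []
--     tok = ""
--     for ch in str:
--         if ch == " " or ch == "-":
--             out.append(word_lookup.get(tok.lower(), tok))
--             out.append(ch)
--             tok = ""
--         else:
--             tok += ch
--     out.append(word_lookup.get(tok.lower(), tok))
--     return "".join(out)
-- ===== Notes on version B (the rewrite author's own statement) =====
-- stated objective: alternative
-- what changed: Replaces A's nested split-on-space / split-on-hyphen loops with a single flat left-to-right scan that flushes one token at every space or hyphen and emits the delimiter, so the string is traversed once with no intermediate word lists.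
import Mathlib
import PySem

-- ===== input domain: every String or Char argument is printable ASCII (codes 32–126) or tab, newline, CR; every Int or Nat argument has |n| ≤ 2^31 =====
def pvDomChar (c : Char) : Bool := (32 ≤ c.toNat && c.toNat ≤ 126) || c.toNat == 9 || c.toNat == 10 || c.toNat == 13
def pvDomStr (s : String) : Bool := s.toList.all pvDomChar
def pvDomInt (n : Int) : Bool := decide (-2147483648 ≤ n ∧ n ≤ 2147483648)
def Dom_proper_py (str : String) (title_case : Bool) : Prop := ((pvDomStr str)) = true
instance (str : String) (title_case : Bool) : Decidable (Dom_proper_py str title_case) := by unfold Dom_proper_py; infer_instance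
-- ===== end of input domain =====

-- B replaces A's nested split-on-space / split-on-hyphen loops by a single flat scan that
-- flushes the current token at each space/hyphen (objective: alternative decomposition).

-- ===== PORT A =====
def pvSpecialCaseWords : List String :=
  ["AWS", "ECR", "ECS", "IAM", "VPC", "DBT", "EC2", "RDS", "MySQL", "ML", "MLOps"]

-- hand port of str.title(): exact on ASCII, where the cased characters are exactly a-z/A-Z
-- (uppercase a letter after a non-letter, lowercase a letter after a letter)
def pvTitle (cs : List Char) : List Char :=
  (cs.foldl
    (fun (st : List Char × Bool) c =>
      (st.1 ++ [if PySem.Chars.isalpha c then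
                  (if st.2 then PySem.Chars.lowerChar c else PySem.Chars.upperChar c)
                else c],
       PySem.Chars.isalpha c))
    ([], false)).1

def proper_py (str : String) (title_case : Bool) : String :=
  -- word_lookup = {w.lower(): w for w in SPECIAL_CASE_WORDS}  (ordered insert, keys lowered)
  let word_lookup : PySem.Dict (List Char) (List Char) :=
    (pvSpecialCaseWords.map String.toList).foldl
      (fun d w => d.insert (PySem.Chars.lower w) w) PySem.Dict.empty
  let s : List Char := if title_case then pvTitle str.toList else str.toList
  let words := PySem.Chars.splitOn s [' ']
  let new_words := words.map (fun word =>
    PySem.Chars.join ['-'] ((PySem.Chars.splitOn word ['-']).map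
      (fun subword => word_lookup.getD (PySem.Chars.lower subword) subword)))
  String.ofList (PySem.Chars.join [' '] new_words)

-- ===== PORT B =====
def pvLookupB : PySem.Dict (List Char) (List Char) :=
  (pvSpecialCaseWords.map String.toList).foldl
    (fun d w => d.insert (PySem.Chars.lower w) w) PySem.Dict.empty

-- the single flat scan: tok is the current token; at ' ' or '-' flush it through the lookup
def pvScanB : List Char → List Char → List Char
  | tok, [] => pvLookupB.getD (PySem.Chars.lower tok) tok
  | tok, c :: rest =>
    if c = ' ' ∨ c = '-' then
      pvLookupB.getD (PySem.Chars.lower tok) tok ++ c :: pvScanB [] rest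
    else
      pvScanB (tok ++ [c]) rest

def proper_py_alt (str : String) (title_case : Bool) : String :=
  let s : List Char := if title_case then pvTitle str.toList else str.toList
  String.ofList (pvScanB [] s)

-- ===== PRECONDITION & SPEC =====
def Spec_proper_py (str : String) (title_case : Bool) (out : String) : Prop := out = proper_py_alt str title_case
instance (str : String) (title_case : Bool) (out : String) : Decidable (Spec_proper_py str title_case out) := by unfold Spec_proper_py; infer_instance

-- ===== CLAIM (what is proved, stated in full; the proofs are below) =====
def Claim_equal_proper_py : Prop := ∀ (str : String) (title_case : Bool), Dom_proper_py str title_case → Spec_proper_py str title_case (proper_py str title_case)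

-- ===== LEMMAS AND PROOFS =====

-- a simple structural recursion equal to PySem.Chars.splitOn with a one-character separator
def pvSplitC (d : Char) : List Char → List (List Char)
  | [] => [[]]
  | c :: cs => if c = d then [] :: pvSplitC d cs else (pvSplitC d cs).modifyHead (c :: ·)

theorem pvSplitC_ne_nil (d : Char) (cs : List Char) : pvSplitC d cs ≠ [] := by
  induction cs with
  | nil => simp [pvSplitC]
  | cons c cs ih =>
    simp only [pvSplitC]
    split_ifs
    · simp
    · cases h : pvSplitC d cs with
      | nil => exact absurd h ih
      | cons a t => simp

theorem pvSplitOn_go_eq (d : Char) (fuel : Nat) (l cur : List Char)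
    (acc : List (List Char)) (h : l.length < fuel) :
    PySem.Chars.splitOn.go [d] fuel l cur acc =
      acc.reverse ++ (pvSplitC d l).modifyHead (cur.reverse ++ ·) := by
  induction fuel generalizing l cur acc with
  | zero => omega
  | succ fuel ih =>
    cases l with
    | nil =>
      simp [PySem.Chars.splitOn.go, pvSplitC]
    | cons c rest =>
      simp only [PySem.Chars.splitOn.go]
      by_cases hc : c = d
      · subst hc
        have hpre : List.isPrefixOf [c] (c :: rest) = true := by
          simp [List.isPrefixOf]
        rw [if_pos hpre]
        simp only [List.length_cons, List.length_nil, List.drop_succ_cons, List.drop_zero]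
        rw [ih rest [] (cur.reverse :: acc) (by simp at h; omega)]
        simp only [pvSplitC, List.reverse_nil, List.reverse_cons,
          List.nil_append, List.append_assoc]
        cases pvSplitC c rest <;> simp
      · have hpre : List.isPrefixOf [d] (c :: rest) = false := by
          simp [List.isPrefixOf]
          exact fun h' => (hc h'.symm).elim
        rw [if_neg (by simp [hpre])]
        rw [ih rest (c :: cur) acc (by simp at h; omega)]
        simp only [pvSplitC, if_neg hc]
        congr 1
        cases hsp : pvSplitC d rest with
        | nil => exact absurd hsp (pvSplitC_ne_nil d rest)
        | cons a t => simp

theorem splitOn_single (d : Char) (cs : List Char) :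
    PySem.Chars.splitOn cs [d] = pvSplitC d cs := by
  unfold PySem.Chars.splitOn
  rw [pvSplitOn_go_eq d (cs.length + 1) cs [] [] (by omega)]
  cases h : pvSplitC d cs with
  | nil => exact absurd h (pvSplitC_ne_nil d cs)
  | cons a t => simp

theorem pvSplitC_append_not_mem (d : Char) (tok cs : List Char) (h : d ∉ tok) :
    pvSplitC d (tok ++ cs) = (pvSplitC d cs).modifyHead (tok ++ ·) := by
  induction tok with
  | nil =>
    cases hsp : pvSplitC d cs with
    | nil => exact absurd hsp (pvSplitC_ne_nil d cs)
    | cons a t => simp [hsp]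
  | cons c tok ih =>
    have hc : c ≠ d := by intro hcd; exact h (by simp [hcd])
    simp only [List.cons_append, pvSplitC, if_neg hc,
      ih (by intro hm; exact h (List.mem_cons_of_mem _ hm))]
    cases hsp : pvSplitC d cs with
    | nil => exact absurd hsp (pvSplitC_ne_nil d cs)
    | cons a t => simp

theorem pvSplitC_not_mem (d : Char) (tok : List Char) (h : d ∉ tok) :
    pvSplitC d tok = [tok] := by
  have := pvSplitC_append_not_mem d tok [] h
  simpa [pvSplitC] using this

theorem pvSplitC_sep_cons (d : Char) (tok cs : List Char) (h : d ∉ tok) :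
    pvSplitC d (tok ++ d :: cs) = tok :: pvSplitC d cs := by
  rw [pvSplitC_append_not_mem d tok (d :: cs) h]
  simp [pvSplitC]

-- the lookup step shared by both sides (abbreviation for the proof only)
def pvF (w : List Char) : List Char := pvLookupB.getD (PySem.Chars.lower w) w

-- A-side value of one space-word: hyphen-split, look up every piece, re-join with '-'
def pvHy (w : List Char) : List Char :=
  PySem.Chars.join ['-'] ((pvSplitC '-' w).map pvF)

-- A-side value of the whole (already title-cased) string
def pvASide (cs : List Char) : List Char :=
  PySem.Chars.join [' '] ((pvSplitC ' ' cs).map pvHy)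

theorem join_cons (s x : List Char) (ws : List (List Char)) :
    PySem.Chars.join s (x :: ws) =
      x ++ (if ws.isEmpty then [] else s ++ PySem.Chars.join s ws) := by
  cases ws with
  | nil => simp [PySem.Chars.join, List.intercalate]
  | cons w ws => simp [PySem.Chars.join, List.intercalate, List.intersperse]

theorem pvHy_not_mem (w : List Char) (h : ('-' : Char) ∉ w) : pvHy w = pvF w := by
  simp [pvHy, pvSplitC_not_mem '-' w h, join_cons]

theorem pvHy_sep (tok w : List Char) (h : ('-' : Char) ∉ tok) :
    pvHy (tok ++ '-' :: w) = pvF tok ++ '-' :: pvHy w := by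
  rw [pvHy, pvSplitC_sep_cons '-' tok w h, List.map_cons, join_cons]
  have : (pvSplitC '-' w).map pvF ≠ [] := by
    simp [pvSplitC_ne_nil]
  rw [if_neg (by simpa [List.isEmpty_iff] using this)]
  simp [pvHy]

theorem pvASide_space (tok cs : List Char) (h : (' ' : Char) ∉ tok)
    (h2 : ('-' : Char) ∉ tok) :
    pvASide (tok ++ ' ' :: cs) = pvF tok ++ ' ' :: pvASide cs := by
  rw [pvASide, pvSplitC_sep_cons ' ' tok cs h, List.map_cons, join_cons]
  have : (pvSplitC ' ' cs).map pvHy ≠ [] := by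
    simp [pvSplitC_ne_nil]
  rw [if_neg (by simpa [List.isEmpty_iff] using this)]
  rw [pvHy_not_mem tok h2]
  simp [pvASide]

theorem pvASide_hyphen (tok cs : List Char) (h : (' ' : Char) ∉ tok)
    (h2 : ('-' : Char) ∉ tok) :
    pvASide (tok ++ '-' :: cs) = pvF tok ++ '-' :: pvASide cs := by
  have hsp : (' ' : Char) ∉ tok ++ ['-'] := by
    intro hm
    rcases List.mem_append.mp hm with hm | hm
    · exact h hm
    · simp at hm
  rw [pvASide, show tok ++ '-' :: cs = (tok ++ ['-']) ++ cs by simp,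
    pvSplitC_append_not_mem ' ' (tok ++ ['-']) cs hsp]
  cases hsp2 : pvSplitC ' ' cs with
  | nil => exact absurd hsp2 (pvSplitC_ne_nil ' ' cs)
  | cons w ws =>
    simp only [List.modifyHead, List.map_cons]
    rw [join_cons]
    have hyh : pvHy ((tok ++ ['-']) ++ w) = pvF tok ++ '-' :: pvHy w := by
      rw [show (tok ++ ['-']) ++ w = tok ++ '-' :: w by simp]
      exact pvHy_sep tok w h2
    rw [hyh, pvASide, hsp2, List.map_cons, join_cons]
    simp

theorem pvScanB_eq_ASide (cs tok : List Char)
    (h1 : (' ' : Char) ∉ tok) (h2 : ('-' : Char) ∉ tok) :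
    pvScanB tok cs = pvASide (tok ++ cs) := by
  induction cs generalizing tok with
  | nil =>
    rw [List.append_nil, pvASide, pvSplitC_not_mem ' ' tok h1, List.map_cons,
      List.map_nil, join_cons, pvHy_not_mem tok h2]
    simp [pvScanB, pvF]
  | cons c cs ih =>
    by_cases hc : c = ' ' ∨ c = '-'
    · rw [pvScanB, if_pos hc]
      rcases hc with hc | hc <;> subst hc
      · rw [pvASide_space tok cs h1 h2, ih [] (by simp) (by simp)]
        simp [pvF]
      · rw [pvASide_hyphen tok cs h1 h2, ih [] (by simp) (by simp)]
        simp [pvF]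
    · rw [not_or] at hc
      rw [pvScanB, if_neg (by tauto),
        ih (tok ++ [c]) (by simp; exact ⟨h1, fun h => hc.1 h.symm⟩)
          (by simp; exact ⟨h2, fun h => hc.2 h.symm⟩)]
      simp

-- ===== VERDICT (by name: the statement is the Claim_ definition above) =====
theorem proper_py_spec : Claim_equal_proper_py := by
  intro str title_case _
  show proper_py str title_case = proper_py_alt str title_case
  simp only [proper_py, proper_py_alt]
  rw [pvScanB_eq_ASide _ [] (by simp) (by simp)]
  simp only [List.nil_append, pvASide, splitOn_single]
  rfl
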